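-- pv_equiv track=rewrite | github.com/MehdiiAH/AoC2024 | day9/day9.py | get_gaps
-- ===== SOURCE A (Python) =====
-- def get_gaps(blocks):
--     gaps = []
--     start = -1
--     for i, block in enumerate(blocks):
--         if block == ".":
--             if start == -1:
--                 start = i
--         elif start != -1:
--             gaps.append((start, i - start))
--             start = -1
--     if start != -1:
--         gaps.append((start, len(blocks) - start))
--     return gaps
-- ===== SOURCE B (Python) =====
-- def get_gaps(blocks):
--     # Run-peeling two-pointer scan: peel each maximal run of equal blocks,
--     # emit (start, length) for the '.'-runs; no sentinel, no post-loop flush.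
--     gaps = []
--     i = 0
--     n = len(blocks)
--     while i < n:
--         j = i
--         while j < n and blocks[j] == blocks[i]:
--             j += 1
--         if blocks[i] == ".":
--             gaps.append((i, j - i))
--         i = j
--     return gaps
-- ===== Notes on version B (the rewrite author's own statement) =====
-- stated objective: alternative
-- what changed: Replaces the element-by-element state machine with a -1 start sentinel and a post-loop flush by a two-pointer run-peeling scan that finds each maximal run of equal blocks and emits '.'-runs directly.
import Mathlib
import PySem

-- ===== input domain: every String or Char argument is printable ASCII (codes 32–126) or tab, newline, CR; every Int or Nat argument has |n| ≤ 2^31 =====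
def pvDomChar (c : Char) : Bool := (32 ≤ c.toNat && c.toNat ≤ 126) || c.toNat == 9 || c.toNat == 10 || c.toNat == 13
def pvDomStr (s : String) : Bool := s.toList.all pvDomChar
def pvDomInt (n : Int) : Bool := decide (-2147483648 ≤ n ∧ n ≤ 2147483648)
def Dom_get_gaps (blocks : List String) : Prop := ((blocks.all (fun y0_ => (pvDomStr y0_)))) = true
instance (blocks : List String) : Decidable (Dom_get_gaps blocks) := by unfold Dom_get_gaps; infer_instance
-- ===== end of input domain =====

-- B replaces A's sentinel state machine by a two-pointer run-peeling scan; objective: alternative.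


-- ===== PORT A =====
-- the for-loop over enumerate(blocks) as structural recursion over the same state (gaps, start)
def pvALoop (i : Nat) (blocks : List String) (start : Int) (gaps : List (Int × Int)) :
    List (Int × Int) × Int :=
  match blocks with
  | [] => (gaps, start)
  | block :: rest =>
    if block == "." then
      if start == -1 then pvALoop (i+1) rest (i : Int) gaps
      else pvALoop (i+1) rest start gaps
    else if start != -1 then pvALoop (i+1) rest (-1) (gaps ++ [(start, (i : Int) - start)])
    else pvALoop (i+1) rest start gaps

def get_gaps (blocks : List String) : List (Int × Int) :=
  let p := pvALoop 0 blocks (-1) []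
  if p.2 != -1 then p.1 ++ [(p.2, (blocks.length : Int) - p.2)] else p.1

-- ===== PORT B =====
-- run-peeling scan: the inner while j loop is the takeWhile/dropWhile split of the suffix
def pvBGo (i : Int) (blocks : List String) : List (Int × Int) :=
  match blocks with
  | [] => []
  | b :: rest =>
    let run := rest.takeWhile (· == b)
    let rest' := rest.dropWhile (· == b)
    let len : Int := 1 + run.length
    (if b == "." then [(i, len)] else []) ++ pvBGo (i + len) rest'
termination_by blocks.length
decreasing_by
  simpa using Nat.lt_succ_of_le (List.length_dropWhile_le _ _)

def get_gaps_alt (blocks : List String) : List (Int × Int) := pvBGo 0 blocks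

-- ===== PRECONDITION & SPEC =====
def Spec_get_gaps (blocks : List String) (out : List (Int × Int)) : Prop := out = get_gaps_alt blocks
instance (blocks : List String) (out : List (Int × Int)) : Decidable (Spec_get_gaps blocks out) := by unfold Spec_get_gaps; infer_instance

-- ===== CLAIM (what is proved, stated in full; the proofs are below) =====
def Claim_equal_get_gaps : Prop := ∀ (blocks : List String), Dom_get_gaps blocks → Spec_get_gaps blocks (get_gaps blocks)

-- ===== LEMMAS AND PROOFS =====

-- the 'gaps' accumulator only ever grows at the back
theorem pvALoop_acc (blocks : List String) : ∀ (i : Nat) (start : Int) (gaps : List (Int × Int)),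
    pvALoop i blocks start gaps =
      (gaps ++ (pvALoop i blocks start []).1, (pvALoop i blocks start []).2) := by
  induction blocks with
  | nil => intro i start gaps; simp [pvALoop]
  | cons b rest ih =>
    intro i start gaps
    simp only [pvALoop]
    split_ifs with h1 h2 h3
    · exact ih _ _ _
    · exact ih _ _ _
    · rw [ih (i+1) (-1) (gaps ++ [(start, (i : Int) - start)]),
          ih (i+1) (-1) ([] ++ [(start, (i : Int) - start)])]
      simp
    · exact ih _ _ _

-- skipping a run of non-'.' blocks while start = -1 does nothing
theorem pvALoop_skip (l : List String) : ∀ (rest : List String) (i : Nat) (gaps : List (Int × Int)),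
    (∀ x ∈ l, x ≠ ".") →
    pvALoop i (l ++ rest) (-1) gaps = pvALoop (i + l.length) rest (-1) gaps := by
  induction l with
  | nil => intro rest i gaps _; simp
  | cons b t ih =>
    intro rest i gaps h
    have hb : b ≠ "." := h b (by simp)
    simp only [List.cons_append, pvALoop, beq_iff_eq, hb, if_false, bne_self_eq_false,
      Bool.false_eq_true, if_false]
    rw [ih rest (i+1) gaps (fun x hx => h x (by simp [hx]))]
    congr 1
    simp [List.length_cons]; omega

-- skipping a run of '.' blocks while start ≠ -1 does nothing
theorem pvALoop_dots (l : List String) : ∀ (rest : List String) (i : Nat) (s : Int)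
    (gaps : List (Int × Int)), (∀ x ∈ l, x = ".") → s ≠ -1 →
    pvALoop i (l ++ rest) s gaps = pvALoop (i + l.length) rest s gaps := by
  induction l with
  | nil => intro rest i s gaps _ _; simp
  | cons b t ih =>
    intro rest i s gaps h hs
    have hb : b = "." := h b (by simp)
    simp only [List.cons_append, pvALoop, hb, beq_self_eq_true, if_true, beq_iff_eq, hs, if_false]
    rw [ih rest (i+1) s gaps (fun x hx => h x (by simp [hx])) hs]
    congr 1
    simp [List.length_cons]; omega

-- A's result, when the loop is entered at position i with fresh state
def pvFinish (i : Nat) (blocks : List String) : List (Int × Int) :=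
  let p := pvALoop i blocks (-1) []
  if p.2 != -1 then p.1 ++ [(p.2, ((i + blocks.length : Nat) : Int) - p.2)] else p.1

theorem pvDropWhile_head_false {a : Type} (p : a -> Bool) (l : List a) (c : a) (t : List a)
    (h : l.dropWhile p = c :: t) : p c = false := by
  induction l with
  | nil => simp at h
  | cons x l ih =>
    by_cases hp : p x
    · simp only [List.dropWhile_cons, hp, if_true] at h; exact ih h
    · simp only [List.dropWhile_cons, hp, Bool.false_eq_true, if_false, List.cons.injEq] at h
      rw [← h.1]; simpa using hp

theorem pvMain (blocks : List String) (i : Nat) : pvFinish i blocks = pvBGo (i : Int) blocks := by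
  match blocks with
  | [] => simp [pvFinish, pvALoop, pvBGo]
  | b :: rest =>
    have hsplit : rest.takeWhile (· == b) ++ rest.dropWhile (· == b) = rest :=
      List.takeWhile_append_dropWhile
    have hlt : (rest.dropWhile (· == b)).length < (b :: rest).length :=
      Nat.lt_succ_of_le (List.length_dropWhile_le _ _)
    have hlen : (rest.takeWhile (· == b)).length + (rest.dropWhile (· == b)).length = rest.length := by
      have h := congrArg List.length hsplit
      rw [List.length_append] at h
      exact h
    by_cases hb : b = "."
    · subst hb
      -- head is '.', start becomes i, run of dots skipped
      have hruns : ∀ x ∈ rest.takeWhile (· == "."), x = "." := by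
        intro x hx
        exact beq_iff_eq.mp (List.mem_takeWhile_imp (l := rest) (p := (· == ".")) hx)
      have hi : ((i : Int)) ≠ -1 := by omega
      have step1 : pvALoop i ("." :: rest) (-1) [] =
          pvALoop (i + 1 + (rest.takeWhile (· == ".")).length) (rest.dropWhile (· == ".")) (i : Int) [] := by
        simp only [pvALoop, beq_self_eq_true, if_true]
        conv_lhs => rw [← hsplit]
        exact pvALoop_dots _ _ (i+1) (i : Int) [] hruns hi
      rcases hre : rest.dropWhile (· == ".") with _ | ⟨c, rest''⟩
      · -- the '.'-run reaches the end of the list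
        have hlr : (rest.takeWhile (· == ".")).length = rest.length := by
          rw [← hlen, hre]; simp
        unfold pvFinish
        rw [step1, hre]
        simp only [pvALoop, pvBGo, beq_self_eq_true, if_true, hre, pvBGo, List.append_nil,
          bne_iff_ne, ne_eq, hi, not_false_eq_true, if_true, List.nil_append]
        have : ((i + ("." :: rest).length : Nat) : Int) - i =
            1 + ((rest.takeWhile (· == ".")).length : Int) := by
          rw [List.length_cons, ← hlr]; push_cast; omega
        rw [this]
      · -- the '.'-run ends at a non-'.' block c
        have hcb : c ≠ "." := by
          have := pvDropWhile_head_false (· == ".") rest c rest'' hre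
          simpa using this
        rw [hre] at step1 hlt
        have step2 : pvALoop (i + 1 + (rest.takeWhile (· == ".")).length) (c :: rest'') (i : Int) [] =
            ([( (i : Int), ((i + 1 + (rest.takeWhile (· == ".")).length : Nat) : Int) - i)] ++
              (pvALoop (i + 1 + (rest.takeWhile (· == ".")).length + 1) rest'' (-1) []).1,
             (pvALoop (i + 1 + (rest.takeWhile (· == ".")).length + 1) rest'' (-1) []).2) := by
          simp only [pvALoop, beq_iff_eq, hcb, if_false, bne_iff_ne, ne_eq, hi,
            not_false_eq_true, if_true]
          rw [pvALoop_acc rest'' (i + 1 + (rest.takeWhile (· == ".")).length + 1) (-1)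
            ([] ++ [((i : Int), ((i + 1 + (rest.takeWhile (· == ".")).length : Nat) : Int) - i)])]
          simp
        have tail_eq : pvFinish (i + 1 + (rest.takeWhile (· == ".")).length) (c :: rest'') =
            (if (pvALoop (i + 1 + (rest.takeWhile (· == ".")).length + 1) rest'' (-1) []).2 != -1 then
              (pvALoop (i + 1 + (rest.takeWhile (· == ".")).length + 1) rest'' (-1) []).1 ++
                [((pvALoop (i + 1 + (rest.takeWhile (· == ".")).length + 1) rest'' (-1) []).2,
                  ((i + 1 + (rest.takeWhile (· == ".")).length + (c :: rest'').length : Nat) : Int) -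
                    (pvALoop (i + 1 + (rest.takeWhile (· == ".")).length + 1) rest'' (-1) []).2)]
             else (pvALoop (i + 1 + (rest.takeWhile (· == ".")).length + 1) rest'' (-1) []).1) := by
          unfold pvFinish
          simp only [pvALoop, beq_iff_eq, hcb, if_false, bne_self_eq_false,
            Bool.false_eq_true, if_false]
        have ih := pvMain (c :: rest'') (i + 1 + (rest.takeWhile (· == ".")).length)
        rw [tail_eq] at ih
        unfold pvFinish
        rw [step1, step2]
        conv_rhs => rw [pvBGo]
        simp only [beq_self_eq_true, if_true, hre]
        have hlen2 : ((i + ("." :: rest).length : Nat) : Int) =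
            ((i + 1 + (rest.takeWhile (· == ".")).length + (c :: rest'').length : Nat) : Int) := by
          have h1 : (rest.takeWhile (· == ".")).length + (c :: rest'').length = rest.length := by
            rw [← hlen, hre]
          simp only [List.length_cons] at h1 ⊢
          push_cast
          push_cast at h1
          omega
        have hstep : ((i : Int)) + (1 + ((rest.takeWhile (· == ".")).length : Int)) =
            (((i + 1 + (rest.takeWhile (· == ".")).length : Nat)) : Int) := by push_cast; omega
        rw [hstep, ← ih]
        have hd : ((i + 1 + (rest.takeWhile (· == ".")).length : Nat) : Int) - (i : Int) =
            1 + ((rest.takeWhile (· == ".")).length : Int) := by push_cast; omega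
        by_cases hflag : (pvALoop (i + 1 + (rest.takeWhile (· == ".")).length + 1) rest'' (-1) []).2 != -1
        · simp only [hflag, if_true]
          rw [hd, hlen2, List.append_assoc]
        · simp only [hflag, Bool.false_eq_true, if_false]
          rw [hd]
    · -- head is not '.', whole run skipped with start = -1
      have hruns : ∀ x ∈ rest.takeWhile (· == b), x ≠ "." := by
        intro x hx hxd
        have hpx : (x == b) = true := List.mem_takeWhile_imp (l := rest) (p := (· == b)) hx
        exact hb (by rw [← beq_iff_eq.mp hpx, hxd])
      have step1 : pvALoop i (b :: rest) (-1) [] =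
          pvALoop (i + 1 + (rest.takeWhile (· == b)).length) (rest.dropWhile (· == b)) (-1) [] := by
        simp only [pvALoop, beq_iff_eq, hb, if_false, bne_self_eq_false, Bool.false_eq_true,
          if_false]
        conv_lhs => rw [← hsplit]
        exact pvALoop_skip _ _ (i+1) [] hruns
      have ih := pvMain (rest.dropWhile (· == b)) (i + 1 + (rest.takeWhile (· == b)).length)
      unfold pvFinish
      rw [step1]
      have hlen2 : ((i + (b :: rest).length : Nat) : Int) =
          ((i + 1 + (rest.takeWhile (· == b)).length + (rest.dropWhile (· == b)).length : Nat) : Int) := by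
        simp only [List.length_cons] at hlen ⊢
        push_cast
        omega
      have heq : (if (pvALoop (i + 1 + (rest.takeWhile (· == b)).length) (rest.dropWhile (· == b)) (-1) []).2 != -1 then
            (pvALoop (i + 1 + (rest.takeWhile (· == b)).length) (rest.dropWhile (· == b)) (-1) []).1 ++
              [((pvALoop (i + 1 + (rest.takeWhile (· == b)).length) (rest.dropWhile (· == b)) (-1) []).2,
                ((i + (b :: rest).length : Nat) : Int) -
                  (pvALoop (i + 1 + (rest.takeWhile (· == b)).length) (rest.dropWhile (· == b)) (-1) []).2)]
           else (pvALoop (i + 1 + (rest.takeWhile (· == b)).length) (rest.dropWhile (· == b)) (-1) []).1) =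
          pvFinish (i + 1 + (rest.takeWhile (· == b)).length) (rest.dropWhile (· == b)) := by
        unfold pvFinish
        rw [hlen2]
      rw [heq, ih]
      conv_rhs => rw [pvBGo]
      simp only [beq_iff_eq, hb, if_false, List.nil_append]
      congr 1
      push_cast; omega
termination_by blocks.length
decreasing_by
  · simpa [hre] using hlt
  · exact hlt

-- ===== VERDICT (by name: the statement is the Claim_ definition above) =====
theorem get_gaps_spec : Claim_equal_get_gaps := by
  intro blocks _
  show get_gaps blocks = get_gaps_alt blocks
  have := pvMain blocks 0
  unfold pvFinish at this
  simpa [get_gaps, get_gaps_alt] using this
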